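-- pv_equiv track=rewrite | github.com/FashionFlora/mantoq-ipa | mantoq/lib/buck/ipa.py | _get_syllweight
-- ===== SOURCE A (Python) =====
-- _VOWELS = {"aa", "AA", "uu0", "uu1", "UU0", "UU1", "ii0", "ii1", "II0", "II1", "a", "A", "u0", "u1", "U0", "U1", "i0", "i1", "I0", "I1"}
--
-- _PUNCT = {".", ",", "?", "!", ":", ";", "؛", "،", "؟", "-", '"', "'"}
--
-- def _get_syllweight(syll):
--     v_weight = 0
--     coda_len = 0
--     vowel_found = False
--     for t in syll:
--         if t in _VOWELS:
--             vowel_found = True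
--             if len(t) >= 2 and t[:2].lower() in ['aa', 'uu', 'ii']:
--                 v_weight = 2
--             else:
--                 v_weight = 1
--         elif vowel_found and t not in _PUNCT:
--             coda_len += 1
--
--     if (v_weight == 2 and coda_len >= 1) or (v_weight == 1 and coda_len >= 2):
--         return 'superheavy'
--     elif (v_weight == 2 and coda_len == 0) or (v_weight == 1 and coda_len == 1):
--         return 'heavy'
--     else:
--         return 'light'
-- ===== SOURCE B (Python) =====
-- _VOWELS = {"aa", "AA", "uu0", "uu1", "UU0", "UU1", "ii0", "ii1", "II0", "II1", "a", "A", "u0", "u1", "U0", "U1", "i0", "i1", "I0", "I1"}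
--
-- _PUNCT = {".", ",", "?", "!", ":", ";", "؛", "،", "؟", "-", '"', "'"}
--
--
-- def _get_syllweight(syll):
--     # Drop the onset: everything before the first vowel token.
--     rest = syll
--     while rest and rest[0] not in _VOWELS:
--         rest = rest[1:]
--     if not rest:
--         return 'light'
--     # Nucleus weight comes from the LAST vowel token.
--     last_v = [t for t in rest if t in _VOWELS][-1]
--     v_weight = 2 if len(last_v) >= 2 and last_v[:2].lower() in ('aa', 'uu', 'ii') else 1
--     # Coda: every non-vowel, non-punctuation token after the first vowel.
--     coda_len = len([t for t in rest[1:] if t not in _VOWELS and t not in _PUNCT])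
--     if coda_len + v_weight >= 3:
--         return 'superheavy'
--     if coda_len + v_weight == 2:
--         return 'heavy'
--     return 'light'
-- ===== Notes on version B (the rewrite author's own statement) =====
-- stated objective: simpler
-- what changed: Replaces A's single stateful scan (v_weight/coda_len/vowel_found flags) by shaped passes: drop the pre-vowel prefix, read the weight off the last vowel with one filter, count the coda with one filtered comprehension, then a single arithmetic threshold coda_len + v_weight instead of A's four-clause boolean ladder.
import Mathlib
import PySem

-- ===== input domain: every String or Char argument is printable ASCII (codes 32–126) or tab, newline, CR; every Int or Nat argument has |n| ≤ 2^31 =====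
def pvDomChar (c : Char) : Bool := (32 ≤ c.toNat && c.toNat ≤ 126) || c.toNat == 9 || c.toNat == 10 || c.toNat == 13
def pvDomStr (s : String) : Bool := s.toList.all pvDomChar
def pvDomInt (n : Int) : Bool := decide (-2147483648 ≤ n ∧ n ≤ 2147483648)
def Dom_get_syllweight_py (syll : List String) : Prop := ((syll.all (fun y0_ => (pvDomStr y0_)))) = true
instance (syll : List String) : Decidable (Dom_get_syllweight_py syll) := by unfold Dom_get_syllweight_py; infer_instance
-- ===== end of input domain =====

-- B changes the decomposition: shaped passes (drop onset, filter for last vowel, filtered coda count,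
-- one arithmetic threshold) instead of A's single stateful scan with three loop variables. Same cost.

-- ===== PORT A =====
-- module constants _VOWELS / _PUNCT and the long-vowel test, shared verbatim by both Python versions
def pvVowels : List String := ["aa", "AA", "uu0", "uu1", "UU0", "UU1", "ii0", "ii1", "II0", "II1", "a", "A", "u0", "u1", "U0", "U1", "i0", "i1", "I0", "I1"]
def pvPunct : List String := [".", ",", "?", "!", ":", ";", "؛", "،", "؟", "-", "\"", "'"]
def isV (t : String) : Bool := pvVowels.contains t
def isP (t : String) : Bool := pvPunct.contains t
-- len(t) >= 2 and t[:2].lower() in ['aa','uu','ii']  (exact: PySem.Str.len / slice / lower)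
def isLong (t : String) : Bool :=
  decide (2 ≤ PySem.Str.len t) && ["aa", "uu", "ii"].contains (PySem.Str.lower (PySem.Str.slice t none (some 2)))

-- loop body of A: state (v_weight, coda_len, vowel_found)
def stepA (st : Int × Int × Bool) (t : String) : Int × Int × Bool :=
  if isV t then (if isLong t then 2 else 1, st.2.1, true)
  else if st.2.2 && !isP t then (st.1, st.2.1 + 1, st.2.2)
  else st

def get_syllweight_py (syll : List String) : String :=
  let st := syll.foldl stepA (0, 0, false)
  let v : Int := st.1
  let c : Int := st.2.1
  if (v == 2 && decide (1 ≤ c)) || (v == 1 && decide (2 ≤ c)) then "superheavy"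
  else if (v == 2 && c == 0) || (v == 1 && c == 1) then "heavy"
  else "light"

-- ===== PORT B =====
-- the while loop of Source B: drop leading tokens while they are not vowels
def dropOnset : List String → List String
  | [] => []
  | t :: r => if !isV t then dropOnset r else t :: r

def get_syllweight_py_alt (syll : List String) : String :=
  let rest := dropOnset syll
  if rest.isEmpty then "light"
  else
    -- [t for t in rest if t in _VOWELS][-1]: the guard makes the filtered list nonempty,
    -- so pyGet? never misses and the .getD "" default is unreachable
    let lastV := (PySem.List.pyGet? (rest.filter isV) (-1)).getD ""
    let vw : Int := if isLong lastV then 2 else 1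
    let coda : Int := ((PySem.List.slice rest (some 1) none).filter (fun t => !isV t && !isP t)).length
    if decide (3 ≤ coda + vw) then "superheavy"
    else if coda + vw == 2 then "heavy"
    else "light"

-- ===== PRECONDITION & SPEC =====
def Spec_get_syllweight_py (syll : List String) (out : String) : Prop := out = get_syllweight_py_alt syll
instance (syll : List String) (out : String) : Decidable (Spec_get_syllweight_py syll out) := by unfold Spec_get_syllweight_py; infer_instance

-- ===== CLAIM (what is proved, stated in full; the proofs are below) =====
def Claim_equal_get_syllweight_py : Prop := ∀ (syll : List String), Dom_get_syllweight_py syll → Spec_get_syllweight_py syll (get_syllweight_py syll)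

-- ===== LEMMAS AND PROOFS =====

-- weight of the last vowel of s, starting from v (A's v_weight variable once a vowel was seen)
def lw (s : List String) (v : Int) : Int :=
  s.foldl (fun a u => if isV u then (if isLong u then 2 else 1) else a) v

def codaP (t : String) : Bool := !isV t && !isP t

lemma vowel_not_punct (u : String) (hu : isV u = true) : isP u = false := by
  unfold isV pvVowels at hu
  simp only [List.contains_eq_mem, List.mem_cons, List.not_mem_nil, or_false, decide_eq_true_eq] at hu
  rcases hu with rfl|rfl|rfl|rfl|rfl|rfl|rfl|rfl|rfl|rfl|rfl|rfl|rfl|rfl|rfl|rfl|rfl|rfl|rfl|rfl <;> decide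

lemma foldA_after (s : List String) : ∀ (v c : Int),
    s.foldl stepA (v, c, true) = (lw s v, c + ((s.filter codaP).length : Int), true) := by
  induction s with
  | nil => intro v c; simp [lw]
  | cons u r ih =>
    intro v c
    by_cases hu : isV u = true
    · simp [List.foldl_cons, stepA, hu, lw, codaP, vowel_not_punct u hu, ih]
    · simp only [Bool.not_eq_true] at hu
      by_cases hp : isP u = true
      · simp [List.foldl_cons, stepA, hu, hp, lw, codaP, ih]
      · simp only [Bool.not_eq_true] at hp
        simp [List.foldl_cons, stepA, hu, hp, lw, codaP, ih]
        omega

lemma last_vowel_weight : ∀ (s : List String) (d : String), isV d = true →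
    (if isLong ((PySem.List.pyGet? ((d :: s).filter isV) (-1)).getD "") then (2 : Int) else 1)
      = lw s (if isLong d then 2 else 1) := by
  intro s
  induction s with
  | nil => intro d hd; simp [lw, PySem.List.pyGet?_neg_one, hd]
  | cons u r ih =>
    intro d hd
    by_cases hu : isV u = true
    · have hne : (u :: r).filter isV ≠ [] := by
        simp [hu]
      have hfil : (d :: u :: r).filter isV = d :: (u :: r).filter isV := by
        simp [List.filter_cons, hd]
      have hlast : ((d :: u :: r).filter isV).getLast? = ((u :: r).filter isV).getLast? := by
        rw [hfil]
        cases h : (u :: r).filter isV with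
        | nil => exact absurd h hne
        | cons a l => simp [List.getLast?_cons_cons]
      have := ih u hu
      rw [PySem.List.pyGet?_neg_one] at *
      rw [hlast, this]
      simp [lw, hu]
    · simp only [Bool.not_eq_true] at hu
      have hfil : (d :: u :: r).filter isV = (d :: r).filter isV := by
        simp [List.filter_cons, hu]
      have := ih d hd
      rw [hfil, this]
      simp [lw, hu]

lemma lw_mem (s : List String) : ∀ (v : Int), (v = 1 ∨ v = 2) → (lw s v = 1 ∨ lw s v = 2) := by
  induction s with
  | nil => intro v h; simpa [lw] using h
  | cons u r ih =>
    intro v h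
    by_cases hu : isV u = true
    · by_cases hl : isLong u = true
      · simpa [lw, hu, hl] using ih 2 (Or.inr rfl)
      · simp only [Bool.not_eq_true] at hl
        simpa [lw, hu, hl] using ih 1 (Or.inl rfl)
    · simp only [Bool.not_eq_true] at hu
      simpa [lw, hu] using ih v h

lemma classify_eq (w n : Int) (hw : w = 1 ∨ w = 2) (hn : 0 ≤ n) :
    (if (w == 2 && decide (1 ≤ n)) || (w == 1 && decide (2 ≤ n)) then "superheavy"
     else if (w == 2 && n == 0) || (w == 1 && n == 1) then "heavy" else "light")
    = (if decide (3 ≤ n + w) then "superheavy"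
       else if n + w == 2 then "heavy" else "light") := by
  rcases hw with rfl | rfl <;>
    simp only [beq_iff_eq, decide_eq_true_eq, Bool.or_eq_true, Bool.and_eq_true] <;>
    split_ifs <;> first | rfl | omega | (simp_all; omega) | simp_all

lemma ab_eq (syll : List String) : get_syllweight_py syll = get_syllweight_py_alt syll := by
  induction syll with
  | nil => rfl
  | cons t s ih =>
    by_cases ht : isV t = true
    · have hdrop : dropOnset (t :: s) = t :: s := by simp [dropOnset, ht]
      have hfold : (t :: s).foldl stepA (0, 0, false)
          = (lw s (if isLong t then 2 else 1), 0 + ((s.filter codaP).length : Int), true) := by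
        simp only [List.foldl_cons, stepA, ht, if_pos]
        exact foldA_after s _ 0
      have hlw := last_vowel_weight s t ht
      have hmem := lw_mem s (if isLong t then 2 else 1)
        (by by_cases h : isLong t = true <;> simp [h])
      unfold get_syllweight_py get_syllweight_py_alt
      rw [hfold, hdrop]
      have hcoda : (fun t => !isV t && !isP t) = codaP := by
        funext t; simp [codaP]
      simp only [List.isEmpty_cons, Bool.false_eq_true, if_false, PySem.List.slice_from_one,
        List.tail_cons, hlw, zero_add, hcoda]
      exact classify_eq _ _ hmem (Int.natCast_nonneg _)
    · simp only [Bool.not_eq_true] at ht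
      have hA : get_syllweight_py (t :: s) = get_syllweight_py s := by
        unfold get_syllweight_py
        simp [List.foldl_cons, stepA, ht]
      have hB : get_syllweight_py_alt (t :: s) = get_syllweight_py_alt s := by
        unfold get_syllweight_py_alt
        simp [dropOnset, ht]
      rw [hA, hB, ih]

-- ===== VERDICT (by name: the statement is the Claim_ definition above) =====
theorem get_syllweight_py_spec : Claim_equal_get_syllweight_py := by
  intro syll _
  unfold Spec_get_syllweight_py
  exact ab_eq syll
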